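-- pv_equiv track=rewrite | github.com/dorfner/mpi-nbbodies | n-bodies-opt.py | optimalBodiesDistribution
-- ===== SOURCE A (Python) =====
-- def optimalBodiesDistribution(N, size):
--     # list to return
--     indices = []
--     # p is the number of iterations necessary in the asymetric algorithm divided by the number of processes
--     p = (N*(N-1)) // (2*size)
--     # seq is a sequence that helps compute the indices of the optimal distribution
--     seq = 0
--
--     for i in range(1,N):
--         seq = (seq%p) + i
--         if (seq >= p):
--             indices += [i]
--
--     return indices
-- ===== SOURCE B (Python) =====
-- def optimalBodiesDistribution(N, size):
--     # i crosses the threshold exactly when T(i-1) % p + i >= p, where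
--     # T(k) = k*(k+1)//2 is the running triangular sum; so each index can be
--     # tested by a closed-form, stateless predicate instead of carrying seq.
--     p = (N*(N-1)) // (2*size)
--     return [i for i in range(1, N) if (i*(i-1)//2) % p + i >= p]
-- ===== Notes on version B (the rewrite author's own statement) =====
-- stated objective: alternative
-- what changed: Replaces the stateful seq = (seq % p) + i recurrence carried across the loop by a stateless closed-form test ((i*(i-1)//2) % p + i >= p) on each index, using the invariant seq_i ≡ T_i (mod p).
import Mathlib
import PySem

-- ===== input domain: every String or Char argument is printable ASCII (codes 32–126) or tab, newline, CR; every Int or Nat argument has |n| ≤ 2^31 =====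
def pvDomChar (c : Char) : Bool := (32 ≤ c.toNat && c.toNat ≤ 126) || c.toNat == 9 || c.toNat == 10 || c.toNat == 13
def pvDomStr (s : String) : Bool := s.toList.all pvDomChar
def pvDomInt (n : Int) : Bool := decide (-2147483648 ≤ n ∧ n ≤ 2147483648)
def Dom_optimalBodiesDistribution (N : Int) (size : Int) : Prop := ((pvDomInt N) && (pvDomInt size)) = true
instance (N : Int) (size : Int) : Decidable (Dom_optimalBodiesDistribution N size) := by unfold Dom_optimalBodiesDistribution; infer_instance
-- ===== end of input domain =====

-- B replaces A's stateful seq = (seq % p) + i recurrence by a stateless closed-form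
-- per-index test (i*(i-1)//2) % p + i >= p (objective: alternative decomposition).

-- ===== PORT A =====
def optimalBodiesDistribution (N : Int) (size : Int) : List Int :=
  let p := PySem.Int.floordiv (N * (N - 1)) (2 * size)
  ((PySem.List.pyRange 1 N 1).foldl
    (fun (st : List Int × Int) i =>
      let seq := PySem.Int.mod st.2 p + i
      (if seq ≥ p then st.1 ++ [i] else st.1, seq))
    ([], 0)).1

-- ===== PORT B =====
def optimalBodiesDistribution_alt (N : Int) (size : Int) : List Int :=
  let p := PySem.Int.floordiv (N * (N - 1)) (2 * size)
  (PySem.List.pyRange 1 N 1).filter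
    (fun i => decide (PySem.Int.mod (PySem.Int.floordiv (i * (i - 1)) 2) p + i ≥ p))

-- ===== PRECONDITION & SPEC =====
-- Pre_ excludes exactly the inputs where Python A raises ZeroDivisionError:
-- size = 0 (division by zero computing p), or p = 0 while the loop runs (seq % 0).
def Pre_optimalBodiesDistribution (N : Int) (size : Int) : Prop :=
  size ≠ 0 ∧ (N < 2 ∨ PySem.Int.floordiv (N * (N - 1)) (2 * size) ≠ 0)
instance (N : Int) (size : Int) : Decidable (Pre_optimalBodiesDistribution N size) := by
  unfold Pre_optimalBodiesDistribution; infer_instance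

def pvWitness_optimalBodiesDistribution : Int × Int := (10, 3)

def Spec_optimalBodiesDistribution (N : Int) (size : Int) (out : List Int) : Prop := out = optimalBodiesDistribution_alt N size
instance (N : Int) (size : Int) (out : List Int) : Decidable (Spec_optimalBodiesDistribution N size out) := by unfold Spec_optimalBodiesDistribution; infer_instance

-- ===== CLAIM (what is proved, stated in full; the proofs are below) =====
def Claim_equal_optimalBodiesDistribution : Prop := ∀ (N : Int) (size : Int), Dom_optimalBodiesDistribution N size → Pre_optimalBodiesDistribution N size → Spec_optimalBodiesDistribution N size (optimalBodiesDistribution N size)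

-- ===== LEMMAS AND PROOFS =====

-- Python-mod congruence: reducing the left summand mod p first does not change the result.
theorem pvFmodAdd (a c p : Int) : (a.fmod p + c).fmod p = (a + c).fmod p := by
  conv_rhs => rw [← Int.fmod_add_mul_fdiv a p]
  rw [show a.fmod p + p * a.fdiv p + c = a.fmod p + c + p * a.fdiv p from by ring,
      Int.add_mul_fmod_self_left]

-- Triangular-number step: (i+1)*i // 2 = i*(i-1) // 2 + i (floor division is exact here).
theorem pvTriStep (i : Int) :
    PySem.Int.floordiv ((i + 1) * i) 2 = PySem.Int.floordiv (i * (i - 1)) 2 + i := by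
  show ((i + 1) * i).fdiv 2 = (i * (i - 1)).fdiv 2 + i
  rw [Int.fdiv_eq_ediv, Int.fdiv_eq_ediv]
  have h : (i + 1) * i = i * (i - 1) + 2 * i := by ring
  generalize hx : i * (i - 1) = x at h ⊢
  omega

-- Loop invariant: after processing range(1, n+1), the accumulator is the filtered
-- list and the carried seq is congruent to the triangular number T(n) modulo p.
theorem pvInv (p : Int) (n : Nat) :
    ∃ s : Int,
      ((PySem.List.pyRange 1 (1 + (n : Int)) 1).foldl
        (fun (st : List Int × Int) i =>
          (if PySem.Int.mod st.2 p + i ≥ p then st.1 ++ [i] else st.1,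
           PySem.Int.mod st.2 p + i))
        ([], 0)) =
      ((PySem.List.pyRange 1 (1 + (n : Int)) 1).filter
        (fun i => decide (PySem.Int.mod (PySem.Int.floordiv (i * (i - 1)) 2) p + i ≥ p)), s)
      ∧ s.fmod p = (PySem.Int.floordiv ((1 + (n : Int)) * ((1 + (n : Int)) - 1)) 2).fmod p := by
  induction n with
  | zero =>
      refine ⟨0, ?_, ?_⟩
      · rw [PySem.List.pyRange_one_eq_nil (by omega)]; simp
      · norm_num [PySem.Int.floordiv]
  | succ k ih =>
      obtain ⟨s, hfold, hs⟩ := ih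
      have hsplit : PySem.List.pyRange 1 (1 + ((k + 1 : Nat) : Int)) 1
          = PySem.List.pyRange 1 (1 + (k : Int)) 1 ++ [1 + (k : Int)] := by
        push_cast
        rw [show (1 : Int) + ((k : Int) + 1) = (1 + (k : Int)) + 1 from by ring]
        exact PySem.List.pyRange_one_succ_right (by omega)
      have hmods : PySem.Int.mod s p
          = PySem.Int.mod (PySem.Int.floordiv ((1 + (k : Int)) * ((1 + (k : Int)) - 1)) 2) p := hs
      refine ⟨PySem.Int.mod s p + (1 + (k : Int)), ?_, ?_⟩
      · rw [hsplit, List.foldl_append, List.filter_append, hfold]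
        simp only [List.foldl_cons, List.foldl_nil, List.filter_cons, List.filter_nil]
        have hcond' : (p ≤ PySem.Int.mod s p + (1 + (k : Int))) ↔
            (p ≤ PySem.Int.mod (PySem.Int.floordiv ((1 + (k : Int)) * ((1 + (k : Int)) - 1)) 2) p
              + (1 + (k : Int))) := by rw [hmods]
        by_cases h : p ≤ PySem.Int.mod (PySem.Int.floordiv ((1 + (k : Int)) * ((1 + (k : Int)) - 1)) 2) p
            + (1 + (k : Int))
        · rw [if_pos (hcond'.mpr h), if_pos (decide_eq_true h)]
        · rw [if_neg (fun hh => h (hcond'.mp hh)), if_neg (by simpa using h), List.append_nil]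
      · show (s.fmod p + (1 + (k : Int))).fmod p = _
        rw [hs, pvFmodAdd]
        have hc : (1 + ((k + 1 : Nat) : Int)) * ((1 + ((k + 1 : Nat) : Int)) - 1)
            = ((1 + (k : Int)) + 1) * (1 + (k : Int)) := by push_cast; ring
        rw [hc, pvTriStep (1 + (k : Int))]

-- ===== VERDICT (by name: the statement is the Claim_ definition above) =====
theorem optimalBodiesDistribution_spec : Claim_equal_optimalBodiesDistribution := by
  intro N size _ _
  unfold Spec_optimalBodiesDistribution optimalBodiesDistribution optimalBodiesDistribution_alt
  by_cases hN : N < 2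
  · rw [PySem.List.pyRange_one_eq_nil (by omega)]; rfl
  · obtain ⟨s, hfold, -⟩ := pvInv (PySem.Int.floordiv (N * (N - 1)) (2 * size)) (N - 1).toNat
    have hNe : 1 + (((N - 1).toNat : Int)) = N := by omega
    rw [hNe] at hfold
    simp only [hfold]
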